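-- pv_equiv track=rewrite | github.com/Romina-Aguilera/INF_131 | 2021-2/Tarea 9/Tarea 9.py | obtener_postulaciones
-- ===== SOURCE A (Python) =====
-- def obtener_postulaciones (carreras,postulantes):
--     d={}
--     lista=[]
--     for codigo,carrera in carreras:
--         for nombre,cod,gen in postulantes:
--             if cod==codigo:
--                 lista.append(nombre)
--                 d[carrera]=lista
--         lista=[]
--     return d
-- ===== SOURCE B (Python) =====
-- def obtener_postulaciones(carreras, postulantes):
--     idx = {}
--     for nombre, cod, gen in postulantes:
--         idx.setdefault(cod, []).append(nombre)
--     d = {}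
--     for codigo, carrera in carreras:
--         nombres = idx.get(codigo)
--         if nombres:
--             d[carrera] = nombres
--     return d
-- ===== Notes on version B (the rewrite author's own statement) =====
-- stated objective: faster
-- what changed: B builds a dict index from postulante code to the list of names in one pass, then does a single pass over carreras looking each code up, instead of A's nested scan of all postulantes for every carrera.
import Mathlib
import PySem

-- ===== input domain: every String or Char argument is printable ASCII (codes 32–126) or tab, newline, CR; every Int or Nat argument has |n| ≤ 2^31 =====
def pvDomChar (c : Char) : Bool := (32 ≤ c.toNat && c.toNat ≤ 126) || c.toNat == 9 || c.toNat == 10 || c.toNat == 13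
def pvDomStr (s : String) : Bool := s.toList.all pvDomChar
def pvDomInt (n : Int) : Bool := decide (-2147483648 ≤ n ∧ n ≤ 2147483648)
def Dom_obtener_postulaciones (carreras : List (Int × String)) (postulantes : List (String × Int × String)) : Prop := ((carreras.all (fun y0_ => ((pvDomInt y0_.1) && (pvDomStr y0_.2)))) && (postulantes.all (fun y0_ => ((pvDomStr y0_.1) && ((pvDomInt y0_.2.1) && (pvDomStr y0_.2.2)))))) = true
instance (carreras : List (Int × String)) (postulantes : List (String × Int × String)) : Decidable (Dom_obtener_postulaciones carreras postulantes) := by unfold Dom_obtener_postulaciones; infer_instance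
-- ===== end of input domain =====

-- B replaces A's nested scan (each carrera rescans all postulantes) by a code→names dict index built
-- in one pass plus a single lookup pass over carreras: same result, measured faster.

-- ===== PORT A =====
def obtener_postulaciones (carreras : List (Int × String)) (postulantes : List (String × Int × String)) : List (String × List String) :=
  (carreras.foldl
    (fun (st : PySem.Dict String (List String) × List String) c =>
      let codigo := c.1; let carrera := c.2
      let st' := postulantes.foldl
        (fun (st : PySem.Dict String (List String) × List String) p =>
          let nombre := p.1; let cod := p.2.1
          if cod == codigo then
            let lista := st.2 ++ [nombre]
            (st.1.insert carrera lista, lista)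
          else st) st
      (st'.1, []))   -- 'lista = []' reset at the end of each outer iteration
    (PySem.Dict.empty, [])).1.items

-- ===== PORT B =====
def obtener_postulaciones_alt (carreras : List (Int × String)) (postulantes : List (String × Int × String)) : List (String × List String) :=
  -- idx.setdefault(cod, []).append(nombre)  ==  idx[cod] = idx.get(cod, []) + [nombre]
  let idx : PySem.Dict Int (List String) :=
    postulantes.foldl (fun idx p => idx.modify p.2.1 [] (· ++ [p.1])) PySem.Dict.empty
  (carreras.foldl
    (fun (d : PySem.Dict String (List String)) c =>
      match idx.get? c.1 with
      | some nombres => if nombres.isEmpty then d else d.insert c.2 nombres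
      | none => d)
    PySem.Dict.empty).items

-- ===== PRECONDITION & SPEC =====
def Spec_obtener_postulaciones (carreras : List (Int × String)) (postulantes : List (String × Int × String)) (out : List (String × List String)) : Prop := out = obtener_postulaciones_alt carreras postulantes
instance (carreras : List (Int × String)) (postulantes : List (String × Int × String)) (out : List (String × List String)) : Decidable (Spec_obtener_postulaciones carreras postulantes out) := by unfold Spec_obtener_postulaciones; infer_instance

-- ===== CLAIM (what is proved, stated in full; the proofs are below) =====
def Claim_equal_obtener_postulaciones : Prop := ∀ (carreras : List (Int × String)) (postulantes : List (String × Int × String)), Dom_obtener_postulaciones carreras postulantes → Spec_obtener_postulaciones carreras postulantes (obtener_postulaciones carreras postulantes)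

-- ===== LEMMAS AND PROOFS =====

-- names of postulantes with code c, in order: the list both programs associate with a matching carrera
def pvMatches (postulantes : List (String × Int × String)) (c : Int) : List String :=
  (postulantes.filter (fun p => p.2.1 == c)).map (·.1)

theorem pvMatches_cons (p : String × Int × String) (ps : List (String × Int × String)) (c : Int) :
    pvMatches (p :: ps) c = if p.2.1 == c then p.1 :: pvMatches ps c else pvMatches ps c := by
  by_cases h : p.2.1 == c <;> simp [pvMatches, h]

-- A's inner loop from state (d, lista): the final lista is lista ++ matches, and d ends up with exactly
-- one effective insert (the last one, carrying the full list) iff there was any match.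
theorem innerA_eq (postulantes : List (String × Int × String)) (codigo : Int) (carrera : String)
    (d : PySem.Dict String (List String)) (lista : List String) :
    postulantes.foldl
      (fun (st : PySem.Dict String (List String) × List String) p =>
        if p.2.1 == codigo then (st.1.insert carrera (st.2 ++ [p.1]), st.2 ++ [p.1]) else st)
      (d, lista)
    = (if (pvMatches postulantes codigo).isEmpty then d
       else d.insert carrera (lista ++ pvMatches postulantes codigo),
       lista ++ pvMatches postulantes codigo) := by
  induction postulantes generalizing d lista with
  | nil => simp [pvMatches]
  | cons p ps ih =>
    rw [List.foldl_cons, pvMatches_cons]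
    by_cases h : p.2.1 == codigo
    · rw [if_pos h, if_pos h, ih]
      by_cases hm : pvMatches ps codigo = []
      · simp [hm]
      · simp [hm, PySem.Dict.insert_insert_self]
    · rw [if_neg h, if_neg h, ih]

-- B's index lookup returns exactly the match list (or nothing when there is none)
theorem idx_getD (postulantes : List (String × Int × String)) (c : Int) :
    (postulantes.foldl (fun idx p => idx.modify p.2.1 [] (· ++ [p.1]))
        (PySem.Dict.empty : PySem.Dict Int (List String))).getD c []
    = pvMatches postulantes c := by
  have h := PySem.Dict.getD_foldl_modify_append (l := postulantes.map (fun p => (p.2.1, p.1)))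
      (d := (PySem.Dict.empty : PySem.Dict Int (List String))) (c := c)
  simp only [List.foldl_map] at h
  simpa [pvMatches, List.filter_map, Function.comp] using h

theorem obtener_postulaciones_eq (carreras : List (Int × String)) (postulantes : List (String × Int × String)) :
    obtener_postulaciones carreras postulantes = obtener_postulaciones_alt carreras postulantes := by
  unfold obtener_postulaciones obtener_postulaciones_alt
  simp only []
  congr 1
  -- both folds keep only a Dict; A additionally carries a lista that is [] at each outer step start
  suffices h : ∀ (d : PySem.Dict String (List String)),
      (carreras.foldl
        (fun (st : PySem.Dict String (List String) × List String) c =>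
          let st' := postulantes.foldl
            (fun (st : PySem.Dict String (List String) × List String) p =>
              if p.2.1 == c.1 then (st.1.insert c.2 (st.2 ++ [p.1]), st.2 ++ [p.1]) else st) st
          (st'.1, ([] : List String)))
        (d, [])).1
      = carreras.foldl
          (fun (d : PySem.Dict String (List String)) c =>
            match (postulantes.foldl (fun idx p => idx.modify p.2.1 [] (· ++ [p.1]))
                (PySem.Dict.empty : PySem.Dict Int (List String))).get? c.1 with
            | some nombres => if nombres.isEmpty then d else d.insert c.2 nombres
            | none => d) d by
    exact h _
  intro d
  induction carreras generalizing d with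
  | nil => rfl
  | cons c cs ih =>
    simp only [List.foldl_cons]
    rw [innerA_eq]
    cases hget : (postulantes.foldl (fun idx p => idx.modify p.2.1 [] (· ++ [p.1]))
        (PySem.Dict.empty : PySem.Dict Int (List String))).get? c.1 with
    | none =>
      have hg : pvMatches postulantes c.1 = [] := by
        have h2 := idx_getD postulantes c.1
        rw [PySem.Dict.getD_eq_get?_getD, hget] at h2
        simpa using h2.symm
      simp only [hg, List.isEmpty_nil, if_true]
      exact ih d
    | some nombres =>
      have hg : nombres = pvMatches postulantes c.1 := by
        have h2 := idx_getD postulantes c.1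
        rw [PySem.Dict.getD_eq_get?_getD, hget] at h2
        simpa using h2
      simp only [hg, List.nil_append]
      by_cases he : (pvMatches postulantes c.1).isEmpty
      · rw [if_pos he]; exact ih d
      · rw [if_neg he]; exact ih _

-- ===== VERDICT (by name: the statement is the Claim_ definition above) =====
theorem obtener_postulaciones_spec : Claim_equal_obtener_postulaciones := by
  intro carreras postulantes _
  exact obtener_postulaciones_eq carreras postulantes
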